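-- pv_equiv track=rewrite | github.com/masterTyper/baekjoon_solved_ac | Bronze/Bronze_II/8958.py | summation
-- ===== SOURCE A (Python) =====
-- def summation(arr):
--     sum = 0
--     result = 0
--     for i in arr:
--         for j in range(1, len(i)+1):
--             sum += j
--         result += sum
--         sum = 0
--     return result
-- ===== SOURCE B (Python) =====
-- def summation(arr):
--     return sum(len(i) * (len(i) + 1) // 2 for i in arr)
-- ===== Notes on version B (the rewrite author's own statement) =====
-- stated objective: faster
-- what changed: Replaces the inner loop summing 1..len(i) with the closed-form triangular number len*(len+1)//2, summed in one pass.
import Mathlib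
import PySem

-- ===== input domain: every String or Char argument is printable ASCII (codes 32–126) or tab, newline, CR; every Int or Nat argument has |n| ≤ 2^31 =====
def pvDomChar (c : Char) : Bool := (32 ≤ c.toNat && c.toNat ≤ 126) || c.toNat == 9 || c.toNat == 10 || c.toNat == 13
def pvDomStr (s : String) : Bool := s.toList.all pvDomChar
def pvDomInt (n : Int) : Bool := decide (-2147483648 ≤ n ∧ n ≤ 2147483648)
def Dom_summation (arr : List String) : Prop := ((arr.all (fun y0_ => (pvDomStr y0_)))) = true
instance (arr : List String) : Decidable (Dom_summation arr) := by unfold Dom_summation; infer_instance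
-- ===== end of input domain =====

-- B replaces A's inner loop (summing 1..len) by the closed form len*(len+1)//2 in one pass.

-- ===== PORT A =====
-- literal port: inner loop over range(1, len(i)+1) accumulates sum, added to result then reset
def summation (arr : List String) : Int :=
  (arr.foldl (fun (st : Int × Int) i =>
    ((0 : Int), st.2 + (PySem.List.pyRange 1 ((i.toList.length : Int) + 1) 1).foldl (fun s j => s + j) st.1)) (0, 0)).2

-- ===== PORT B =====
def summation_alt (arr : List String) : Int :=
  (arr.map (fun i => PySem.Int.floordiv ((i.toList.length : Int) * ((i.toList.length : Int) + 1)) 2)).sum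

-- ===== PRECONDITION & SPEC =====
def Spec_summation (arr : List String) (out : Int) : Prop := out = summation_alt arr
instance (arr : List String) (out : Int) : Decidable (Spec_summation arr out) := by unfold Spec_summation; infer_instance

-- ===== CLAIM (what is proved, stated in full; the proofs are below) =====
def Claim_equal_summation : Prop := ∀ (arr : List String), Dom_summation arr → Spec_summation arr (summation arr)

-- ===== LEMMAS AND PROOFS =====

-- inner loop of A computes the triangular number
lemma triFold_sum (s : Int) (n : Nat) :
    (PySem.List.pyRange 1 ((n : Int) + 1) 1).foldl (fun s j => s + j) s
      = s + (n : Int) * ((n : Int) + 1) / 2 := by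
  rw [PySem.List.pyRange_one]
  have h : (((n : Int) + 1 - 1)).toNat = n := by omega
  rw [h]; clear h
  induction n with
  | zero => simp
  | succ k ih =>
    rw [List.range_succ, List.map_append, List.foldl_append, ih]
    simp only [List.map_cons, List.map_nil, List.foldl_cons, List.foldl_nil]
    push_cast
    have h2 : ((k : Int) + 1) * ((k : Int) + 1 + 1) = (k : Int) * ((k : Int) + 1) + 2 * ((k : Int) + 1) := by ring
    omega

lemma floordiv_tri (n : Nat) :
    PySem.Int.floordiv ((n : Int) * ((n : Int) + 1)) 2 = (n : Int) * ((n : Int) + 1) / 2 := by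
  have h0 : (0:Int) ≤ (n : Int) * ((n : Int) + 1) := by positivity
  simp [PySem.Int.floordiv, Int.fdiv_eq_ediv]

lemma fold_eq (arr : List String) (acc : Int) :
    (arr.foldl (fun (st : Int × Int) i =>
      ((0 : Int), st.2 + (PySem.List.pyRange 1 ((i.toList.length : Int) + 1) 1).foldl (fun s j => s + j) st.1)) (0, acc)).2
    = acc + (arr.map (fun i => PySem.Int.floordiv ((i.toList.length : Int) * ((i.toList.length : Int) + 1)) 2)).sum := by
  induction arr generalizing acc with
  | nil => simp
  | cons x xs ih =>
    simp only [List.foldl_cons, List.map_cons, List.sum_cons]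
    rw [triFold_sum, floordiv_tri, ih]
    ring

-- ===== VERDICT (by name: the statement is the Claim_ definition above) =====
theorem summation_spec : Claim_equal_summation := by
  intro arr _
  show summation arr = summation_alt arr
  unfold summation summation_alt
  simpa using fold_eq arr 0
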